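-- pv_equiv track=rewrite | github.com/TestGuru-DE/TaNoS | src/backend/services/each_choice.py | generate
-- ===== SOURCE A (Python) =====
-- def generate(categories: dict) -> list[dict]:
--     """
--     Erzeugt Each-Choice-Kombinationen:
--     Nimmt pro Kategorie mindestens einen Wert.
--     """
--     keys = list(categories.keys())
--     max_len = max(len(categories[k]) for k in keys)
--     testcases = []
--     for i in range(max_len):
--         tc = {}
--         for key in keys:
--             values = categories[key]
--             tc[key] = values[i % len(values)]
--         testcases.append(tc)
--     return testcases
-- ===== SOURCE B (Python) =====
-- def generate(categories: dict) -> list[dict]: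
--     """
--     Erzeugt Each-Choice-Kombinationen (column-major):
--     baut pro Kategorie eine Spalte und transponiert in Zeilen.
--     """
--     keys = list(categories.keys())
--     max_len = max(len(categories[k]) for k in keys)
--     columns = [[categories[k][i % len(categories[k])] for i in range(max_len)]
--                for k in keys]
--     return [dict(zip(keys, row)) for row in zip(*columns)]
-- ===== Notes on version B (the rewrite author's own statement) =====
-- stated objective: alternative
-- what changed: B builds one value column per key (column-major) and assembles the testcase rows by transposing with zip(*columns), instead of A's row-major nested loops that write each dict field by field.
-- outside the precondition, e.g. on generate({}): A raises ValueError, B raises ValueError; on generate({'x': [], 'y': ['a']}): A raises ZeroDivisionError, B raises ZeroDivisionError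
import Mathlib
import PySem

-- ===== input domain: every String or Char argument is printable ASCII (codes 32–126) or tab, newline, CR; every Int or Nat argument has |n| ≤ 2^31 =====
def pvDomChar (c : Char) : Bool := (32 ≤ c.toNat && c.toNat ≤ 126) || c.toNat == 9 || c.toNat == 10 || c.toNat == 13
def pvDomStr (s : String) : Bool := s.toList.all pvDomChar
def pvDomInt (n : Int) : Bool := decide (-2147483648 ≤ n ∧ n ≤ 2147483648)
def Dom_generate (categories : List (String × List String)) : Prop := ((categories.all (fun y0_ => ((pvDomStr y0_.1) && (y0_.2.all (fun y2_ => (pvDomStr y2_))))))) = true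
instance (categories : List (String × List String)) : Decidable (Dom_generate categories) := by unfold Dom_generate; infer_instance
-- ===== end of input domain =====

-- B builds per-key value columns and transposes them (column-major), instead of A's row-major nested dict writes; objective: alternative decomposition, same cost.

-- ===== PORT A =====
-- categories[k]: first-match lookup in the association list; keys come from the dict itself, so the [] default is unreachable.
def dictGet (categories : List (String × List String)) (k : String) : List String :=
  ((categories.find? (fun p => p.1 == k)).map Prod.snd).getD []

-- max(...) over a generator; Python raises ValueError on an empty argument, which Pre_generate excludes, so the 0 default is unreachable.
def pyMax (xs : List Int) : Int :=
  match xs with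
  | [] => 0
  | x :: rest => rest.foldl max x

def generate (categories : List (String × List String)) : List (List (String × String)) :=
  let keys := categories.map Prod.fst
  let maxLen := pyMax (keys.map (fun k => ((dictGet categories k).length : Int)))
  (PySem.List.pyRange 0 maxLen 1).map (fun i =>
    keys.map (fun key =>
      let values := dictGet categories key
      (key, PySem.List.pyGetD values (PySem.Int.mod i (values.length : Int)) "")))

-- ===== PORT B =====
-- termination measure for pyZipStar: total length of the columns shrinks when every column loses its head
theorem sum_tail_le {alpha : Type} : ∀ (ls : List (List alpha)),
    (ls.map (fun c => c.tail.length)).sum ≤ (ls.map List.length).sum := by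
  intro ls
  induction ls with
  | nil => simp
  | cons a t ih =>
    simp only [List.map_cons, List.sum_cons]
    have : a.tail.length ≤ a.length := by simp [List.length_tail]
    omega

theorem pyZipStar_dec {alpha : Type} (cols : List (List alpha)) (h0 : cols ≠ [])
    (h1 : ∀ c ∈ cols, c ≠ []) :
    ((cols.map (fun c => c.tail)).map List.length).sum < (cols.map List.length).sum := by
  cases cols with
  | nil => exact absurd rfl h0
  | cons c rest =>
    have hcn : c ≠ [] := h1 c (List.mem_cons_self)
    have hcpos : 0 < c.length := List.length_pos_iff.mpr hcn
    have hc : c.tail.length < c.length := by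
      simp only [List.length_tail]; omega
    have hrest := sum_tail_le rest
    simp only [List.map_cons, List.map_map, Function.comp_def, List.sum_cons] at hrest ⊢
    omega

-- zip(*columns): take heads as a row while every column is nonempty (Python's zip truncates at the shortest)
def pyZipStar {alpha : Type} [Inhabited alpha] (cols : List (List alpha)) : List (List alpha) :=
  if h : cols.isEmpty || cols.any (fun c => c.isEmpty) then []
  else (cols.map (fun c => c.headD default)) :: pyZipStar (cols.map (fun c => c.tail))
termination_by (cols.map List.length).sum
decreasing_by
  simp only [Bool.or_eq_true, not_or, List.any_eq_true, List.isEmpty_iff] at h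
  exact pyZipStar_dec cols h.1 (fun c hc hnil => h.2 ⟨c, hc, by simp [hnil]⟩)

def generate_alt (categories : List (String × List String)) : List (List (String × String)) :=
  let keys := categories.map Prod.fst
  let maxLen := pyMax (keys.map (fun k => ((dictGet categories k).length : Int)))
  let columns := keys.map (fun k =>
    (PySem.List.pyRange 0 maxLen 1).map (fun i =>
      let values := dictGet categories k
      PySem.List.pyGetD values (PySem.Int.mod i (values.length : Int)) ""))
  (pyZipStar columns).map (fun row => keys.zip row)

-- ===== PRECONDITION & SPEC =====
-- Pre_ excludes: the empty dict (max() raises ValueError); dicts mixing empty and nonempty value lists (i % 0 raises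
-- ZeroDivisionError); and association lists with duplicate keys, which do not represent a Python dict.
def Pre_generate (categories : List (String × List String)) : Prop :=
  categories ≠ [] ∧ (categories.map Prod.fst).Nodup ∧
    ((∀ p ∈ categories, p.2 ≠ []) ∨ (∀ p ∈ categories, p.2 = []))
instance (categories : List (String × List String)) : Decidable (Pre_generate categories) := by
  unfold Pre_generate; infer_instance

def pvWitness_generate : (List (String × List String)) := [("color", ["red", "blue"]), ("size", ["S"])]

def Spec_generate (categories : List (String × List String)) (out : List (List (String × String))) : Prop := out = generate_alt categories
instance (categories : List (String × List String)) (out : List (List (String × String))) : Decidable (Spec_generate categories out) := by unfold Spec_generate; infer_instance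

-- ===== CLAIM (what is proved, stated in full; the proofs are below) =====
def Claim_equal_generate : Prop := ∀ (categories : List (String × List String)), Dom_generate categories → Pre_generate categories → Spec_generate categories (generate categories)

-- ===== LEMMAS AND PROOFS =====

-- transposing per-key columns (all built over the same index list) yields the row-major traversal
theorem pyZipStar_cols {alpha beta : Type} [Inhabited beta] (ks : List alpha) (hk : ks ≠ [])
    (g : alpha → Int → beta) (is : List Int) :
    pyZipStar (ks.map (fun k => is.map (g k))) = is.map (fun i => ks.map (fun k => g k i)) := by
  induction is generalizing g with
  | nil =>
    have hguard : ((ks.map (fun k => ([] : List Int).map (g k))).isEmpty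
        || (ks.map (fun k => ([] : List Int).map (g k))).any (fun c => c.isEmpty)) = true := by
      cases ks with
      | nil => exact absurd rfl hk
      | cons a t => simp
    rw [pyZipStar, dif_pos hguard]
    simp
  | cons i is' ih =>
    rw [pyZipStar, dif_neg]
    · have ht : (ks.map (fun k => (i :: is').map (g k))).map (fun c => c.tail)
          = ks.map (fun k => is'.map (g k)) := by
        simp [List.map_map, Function.comp_def]
      have hh : (ks.map (fun k => (i :: is').map (g k))).map (fun c => c.headD default)
          = ks.map (fun k => g k i) := by
        simp [List.map_map, Function.comp_def]
      rw [ht, hh, ih]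
      simp
    · cases ks with
      | nil => exact absurd rfl hk
      | cons a t => simp

-- ===== VERDICT (by name: the statement is the Claim_ definition above) =====
theorem generate_spec : Claim_equal_generate := by
  intro categories _ hpre
  unfold Spec_generate generate generate_alt
  simp only []
  have hk : categories.map Prod.fst ≠ [] := by
    cases categories with
    | nil => exact absurd rfl hpre.1
    | cons a t => simp
  rw [pyZipStar_cols (categories.map Prod.fst) hk
    (fun k i => PySem.List.pyGetD (dictGet categories k)
      (PySem.Int.mod i ((dictGet categories k).length : Int)) "")]
  simp only [List.map_map, Function.comp_def]
  apply List.map_congr_left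
  intro i _
  rw [List.zip_map']
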